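-- pv_equiv track=rewrite | github.com/alex-hofsteede/sequencer | sequencer.py | get_value_at
-- ===== SOURCE A (Python) =====
-- def get_value_at(pattern, index):
--     """
--     Takes a pattern representation from the pattern() function
--     and an index, and returns the value we would expect at that
--     index in a series built from that pattern.
--     """
--     if pattern == None:
--         return None
--     if len(pattern) == 1:
--         return pattern[0][index % len(pattern[0])]
--     elif len(pattern) == 2 and len(pattern[1]) == 1: #Optimization, single step sequence, can just multiply step by index
--         return pattern[0][0] + (index * pattern[1][0])
--     elif index == 0:
--         return pattern[0][index]
--     else:
--         return get_value_at(pattern, index - 1) + get_value_at(pattern[1:], index - 1)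
-- ===== SOURCE B (Python) =====
-- def get_value_at(pattern, index):
--     if pattern is None:
--         return None
--     L = len(pattern)
--     if L == 1:
--         return pattern[0][index % len(pattern[0])]
--     if L == 2 and len(pattern[1]) == 1:
--         return pattern[0][0] + index * pattern[1][0]
--     # iterated-difference DP: vals[k] = value at step i of the sequence
--     # whose pattern is pattern[k:]; the last level cycles, the others sum.
--     last = pattern[-1]
--     m = len(last)
--     vals = [row[0] for row in pattern[:-1]] + [last[0 % m]]
--     for i in range(1, index + 1):
--         vals = [a + b for a, b in zip(vals, vals[1:])] + [last[i % m]]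
--     return vals[0]
-- ===== Notes on version B (the rewrite author's own statement) =====
-- stated objective: alternative
-- what changed: Replaces A's two-way recursion (each step recurses on the full pattern and on its tail) with a single upward loop that maintains one running value per difference level (iterated-difference DP), keeping A's two closed-form fast paths.
-- outside the precondition, e.g. on get_value_at([[5], [], [7]], 0): A returns 5, B raises IndexError; on get_value_at([[1, 2], [3], [4], []], 1): A returns 4, B raises ZeroDivisionError
import Mathlib
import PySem

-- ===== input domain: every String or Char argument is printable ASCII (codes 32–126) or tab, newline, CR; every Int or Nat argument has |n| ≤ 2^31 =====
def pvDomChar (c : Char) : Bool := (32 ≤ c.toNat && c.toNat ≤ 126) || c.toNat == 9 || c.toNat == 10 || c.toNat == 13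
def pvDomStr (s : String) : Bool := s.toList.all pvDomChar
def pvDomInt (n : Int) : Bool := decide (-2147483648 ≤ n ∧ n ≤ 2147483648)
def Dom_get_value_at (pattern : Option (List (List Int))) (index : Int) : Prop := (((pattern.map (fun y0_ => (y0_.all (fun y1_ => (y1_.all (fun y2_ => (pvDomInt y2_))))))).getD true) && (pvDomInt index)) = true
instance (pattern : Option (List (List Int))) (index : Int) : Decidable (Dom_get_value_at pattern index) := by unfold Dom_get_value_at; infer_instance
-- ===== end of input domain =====

-- B replaces A's two-way recursion by an upward iterated-difference DP over
-- per-level running sums, keeping A's two closed-form shortcuts (objective: alternative).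

-- ===== PORT A =====
-- Python `row[i % len(row)]` (none = ZeroDivisionError / IndexError)
def pvCycA (row : List Int) (i : Int) : Option Int :=
  match PySem.Int.mod? i (row.length : Int) with
  | none => none
  | some r => PySem.List.pyGet? row r

-- literal transcription of A's recursion; the fuel only makes it total
-- (the top call passes fuel = index.toNat, enough whenever the Python returns)
def pvACore : Nat → List (List Int) → Int → Option Int
  | fuel, p, index =>
    if p.length = 1 then
      pvCycA p.headI index
    else if p.length = 2 ∧ (p.getD 1 []).length = 1 then
      match PySem.List.pyGet? p.headI 0, PySem.List.pyGet? (p.getD 1 []) 0 with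
      | some a, some s => some (a + index * s)
      | _, _ => none
    else if index = 0 then
      PySem.List.pyGet? p.headI index
    else
      match fuel with
      | 0 => none
      | Nat.succ f =>
        match pvACore f p (index - 1), pvACore f (p.drop 1) (index - 1) with
        | some x, some y => some (x + y)
        | _, _ => none

def get_value_at (pattern : Option (List (List Int))) (index : Int) : Option Int :=
  match pattern with
  | none => none
  | some p => pvACore index.toNat p index

-- ===== PORT B =====
-- Python `row[i % len(row)]` (none = ZeroDivisionError / IndexError)
def pvCycB (row : List Int) (i : Int) : Option Int :=
  match PySem.Int.mod? i (row.length : Int) with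
  | none => none
  | some r => PySem.List.pyGet? row r

def get_value_at_alt (pattern : Option (List (List Int))) (index : Int) : Option Int :=
  match pattern with
  | none => none
  | some p =>
    if p.length = 1 then
      pvCycB p.headI index
    else if p.length = 2 ∧ (p.getD 1 []).length = 1 then
      match PySem.List.pyGet? p.headI 0, PySem.List.pyGet? (p.getD 1 []) 0 with
      | some a, some s => some (a + index * s)
      | _, _ => none
    else
      match p.getLast? with
      | none => none
      | some last => do
        let inits ← p.dropLast.mapM (fun row => PySem.List.pyGet? row 0)
        let v0 ← pvCycB last 0
        let vals ← (PySem.List.pyRange 1 (index + 1) 1).foldlM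
          (fun vals i => do
            let c ← pvCycB last i
            pure (List.zipWith (· + ·) vals (vals.drop 1) ++ [c])) (inits ++ [v0])
        vals.head?

-- ===== PRECONDITION & SPEC =====
-- Pre_ excludes inputs where A raises (empty pattern, needed empty row, negative
-- index in the recursive case) and, in the recursive case, inputs with SOME empty
-- row that A's recursion happens not to reach (row position > index): the natural
-- DP of B reads every row's first element and raises there (IndexError/ZeroDivisionError).
def Pre_get_value_at (pattern : Option (List (List Int))) (index : Int) : Prop :=
  match pattern with
  | none => True
  | some p =>
    p ≠ [] ∧
    (if p.length = 1 then p.headI ≠ []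
     else if p.length = 2 ∧ (p.getD 1 []).length = 1 then p.headI ≠ []
     else 0 ≤ index ∧ ∀ row ∈ p, row ≠ [])

instance (pattern : Option (List (List Int))) (index : Int) : Decidable (Pre_get_value_at pattern index) := by
  unfold Pre_get_value_at; rcases pattern with _ | p <;> infer_instance

def pvWitness_get_value_at : Option (List (List Int)) × Int := (some [[1, 2], [3, 4], [5]], 3)

def Spec_get_value_at (pattern : Option (List (List Int))) (index : Int) (out : Option Int) : Prop := out = get_value_at_alt pattern index
instance (pattern : Option (List (List Int))) (index : Int) (out : Option Int) : Decidable (Spec_get_value_at pattern index out) := by unfold Spec_get_value_at; infer_instance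

-- ===== CLAIM (what is proved, stated in full; the proofs are below) =====
def Claim_equal_get_value_at : Prop := ∀ (pattern : Option (List (List Int))) (index : Int), Dom_get_value_at pattern index → Pre_get_value_at pattern index → Spec_get_value_at pattern index (get_value_at pattern index)

-- ===== LEMMAS AND PROOFS =====

def pvF (p : List (List Int)) (n : Nat) : Int :=
  if p.length = 1 then p.headI.getD (n % p.headI.length) 0
  else match n with
    | 0 => p.headI.headI
    | Nat.succ m => pvF p m + pvF (p.drop 1) m
termination_by n
theorem pvCycA_eq (row : List Int) (i : Int) (hrow : row ≠ []) (hi : 0 ≤ i) :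
    pvCycA row i = some (row.getD (i.toNat % row.length) 0) := by
  have hlen : 0 < row.length := List.length_pos_iff.mpr hrow
  obtain ⟨n, rfl⟩ := Int.eq_ofNat_of_zero_le hi
  have h0 : (row.length : Int) ≠ 0 := by exact_mod_cast hlen.ne'
  have hmod : PySem.Int.mod? (n : Int) (row.length : Int) = some ((n % row.length : Nat) : Int) := by
    rw [PySem.Int.mod?, if_neg h0]
    congr 1
    have := PySem.Int.mod_natCast n row.length
    simpa [PySem.Int.mod] using this
  rw [pvCycA, hmod]
  simp only [PySem.List.pyGet?_natCast, List.getElem?_eq_getElem (Nat.mod_lt n hlen),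
    List.getD_eq_getElem?_getD, Int.toNat_natCast, Option.getD_some]

theorem pvF_one (p : List (List Int)) (h : p.length = 1) (n : Nat) :
    pvF p n = p.headI.getD (n % p.headI.length) 0 := by
  rw [pvF.eq_def, if_pos h]

theorem pvF_zero (p : List (List Int)) (h : ¬ p.length = 1) :
    pvF p 0 = p.headI.headI := by
  rw [pvF.eq_def, if_neg h]

theorem pvF_succ (p : List (List Int)) (h : ¬ p.length = 1) (m : Nat) :
    pvF p (m + 1) = pvF p m + pvF (p.drop 1) m := by
  rw [pvF.eq_def, if_neg h]

theorem pvF_special (a b : List Int) (hb : b.length = 1) (n : Nat) :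
    pvF [a, b] n = a.headI + n * b.headI := by
  obtain ⟨y, rfl⟩ := List.length_eq_one_iff.mp hb
  induction n with
  | zero => rw [pvF_zero _ (by simp)]; simp
  | succ m ih =>
      rw [pvF_succ _ (by simp), ih]
      rw [pvF_one _ (by simp)]
      simp [List.headI, Nat.mod_one]
      ring

theorem pvACore_eq (fuel : Nat) : ∀ (p : List (List Int)) (i : Int),
    i.toNat ≤ fuel → 0 ≤ i → p ≠ [] → (∀ row ∈ p, row ≠ []) →
    pvACore fuel p i = some (pvF p i.toNat) := by
  induction fuel with
  | zero =>
      intro p i hf hi hp hrows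
      have : i = 0 := by omega
      subst this
      simp only [Int.toNat_zero]
      rw [pvACore]
      by_cases h1 : p.length = 1
      · obtain ⟨row, rfl⟩ := List.length_eq_one_iff.mp h1
        simp only [List.headI]
        rw [if_pos h1, pvCycA_eq _ _ (hrows _ (by simp) : row ≠ []) le_rfl, pvF_one _ h1]
        simp [List.headI]
      · rw [if_neg h1]
        by_cases h2 : p.length = 2 ∧ (p.getD 1 []).length = 1
        · rw [if_pos h2]
          obtain ⟨a, b, rfl⟩ := List.length_eq_two.mp h2.1
          obtain ⟨x, xs, rfl⟩ := List.exists_cons_of_ne_nil (hrows a (by simp))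
          obtain ⟨y, rfl⟩ := List.length_eq_one_iff.mp (by simpa using h2.2)
          rw [pvF_special _ _ (by simp)]
          simp [List.headI, PySem.List.pyGet?_zero_cons, List.getD]
        · rw [if_neg h2, if_pos rfl, pvF_zero _ h1]
          obtain ⟨x, xs, rfl⟩ := List.exists_cons_of_ne_nil hp
          obtain ⟨z, zs, hzz⟩ := List.exists_cons_of_ne_nil (hrows x (by simp))
          rw [hzz]
          simp [PySem.List.pyGet?_zero_cons, List.headI]
  | succ f ih =>
      intro p i hf hi hp hrows
      rw [pvACore]
      by_cases h1 : p.length = 1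
      · obtain ⟨row, rfl⟩ := List.length_eq_one_iff.mp h1
        simp only [List.headI]
        rw [if_pos h1, pvCycA_eq _ _ (hrows _ (by simp) : row ≠ []) hi, pvF_one _ h1]
        simp [List.headI]
      · rw [if_neg h1]
        by_cases h2 : p.length = 2 ∧ (p.getD 1 []).length = 1
        · rw [if_pos h2]
          obtain ⟨a, b, rfl⟩ := List.length_eq_two.mp h2.1
          obtain ⟨x, xs, rfl⟩ := List.exists_cons_of_ne_nil (hrows a (by simp))
          obtain ⟨y, rfl⟩ := List.length_eq_one_iff.mp (by simpa using h2.2)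
          rw [pvF_special _ _ (by simp), Int.toNat_of_nonneg hi]
          simp [PySem.List.pyGet?_zero_cons, List.headI]
        · rw [if_neg h2]
          by_cases hz : i = 0
          · subst hz
            rw [if_pos rfl]
            simp only [Int.toNat_zero]
            rw [pvF_zero _ h1]
            obtain ⟨x, xs, rfl⟩ := List.exists_cons_of_ne_nil hp
            obtain ⟨z, zs, hzz⟩ := List.exists_cons_of_ne_nil (hrows x (by simp))
            rw [hzz]
            simp [PySem.List.pyGet?_zero_cons, List.headI, hzz]
          · rw [if_neg hz]
            have hlen2 : 2 ≤ p.length := by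
              rcases p with _ | ⟨a, p⟩; · simp at hp
              rcases p with _ | ⟨b, p⟩; · simp at h1
              simp
            have hdp : p.drop 1 ≠ [] := by
              intro h
              have := congrArg List.length h
              simp at this; omega
            have e1 := ih p (i - 1) (by omega) (by omega) hp hrows
            have e2 := ih (p.drop 1) (i - 1) (by omega) (by omega) hdp
              (fun r hr => hrows r (List.mem_of_mem_drop hr))
            rw [e1, e2]
            have hm : i.toNat = (i - 1).toNat + 1 := by omega
            rw [hm, pvF_succ _ h1]

theorem pvCycB_eq (row : List Int) (i : Int) (hrow : row ≠ []) (hi : 0 ≤ i) :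
    pvCycB row i = some (row.getD (i.toNat % row.length) 0) :=
  pvCycA_eq row i hrow hi

theorem pvMapM_head (l : List (List Int)) (h : ∀ r ∈ l, r ≠ []) :
    l.mapM (fun row => PySem.List.pyGet? row 0) = some (l.map List.headI) := by
  induction l with
  | nil => rfl
  | cons x xs ih =>
      obtain ⟨z, zs, hzz⟩ := List.exists_cons_of_ne_nil (h x (by simp))
      rw [List.mapM_cons]
      rw [hzz]
      simp [PySem.List.pyGet?_zero_cons, ih (fun r hr => h r (by simp [hr])), List.headI]

def pvRow (p : List (List Int)) (n : Nat) : List Int :=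
  (List.range p.length).map (fun k => pvF (p.drop k) n)

theorem pvRow_zero (p : List (List Int)) (hp : p ≠ []) (hp2 : 2 ≤ p.length) :
    p.dropLast.map List.headI ++ [(p.getLast hp).getD 0 0] = pvRow p 0 := by
  apply List.ext_getElem
  · simp [pvRow]; omega
  · intro k h1 h2
    simp only [pvRow, List.getElem_map, List.getElem_range]
    by_cases hk : k < p.length - 1
    · rw [List.getElem_append_left (by simp; omega)]
      have hkp : k < p.length := by omega
      have hlen : ¬ (p.drop k).length = 1 := by simp; omega
      rw [pvF_zero _ hlen]
      simp only [List.getElem_map, List.getElem_dropLast]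
      rw [List.drop_eq_getElem_cons hkp]
      simp [List.headI]
    · have hk' : k = p.length - 1 := by
        simp [pvRow] at h2; omega
      subst hk'
      rw [List.getElem_append_right (by simp)]
      rw [List.drop_length_sub_one hp]
      rw [pvF_one _ (by simp)]
      simp [List.headI]

theorem pvRow_succ (p : List (List Int)) (hp2 : 2 ≤ p.length) (n : Nat) :
    pvRow p (n + 1) =
      List.zipWith (· + ·) (pvRow p n) ((pvRow p n).drop 1) ++ [pvF (p.drop (p.length - 1)) (n + 1)] := by
  apply List.ext_getElem
  · simp [pvRow]; omega
  · intro k h1 h2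
    simp only [pvRow, List.getElem_map, List.getElem_range]
    by_cases hk : k < p.length - 1
    · rw [List.getElem_append_left (by simp [pvRow]; omega)]
      rw [List.getElem_zipWith]
      have hlen : ¬ (p.drop k).length = 1 := by simp; omega
      rw [pvF_succ _ hlen, List.drop_drop]
      have h1k : (1:Nat) + k = k + 1 := Nat.add_comm 1 k
      simp [pvRow, List.getElem_drop, List.getElem_map, List.getElem_range, h1k]
    · have hk' : k = p.length - 1 := by
        simp [pvRow] at h1; omega
      subst hk'
      rw [List.getElem_append_right (by simp [pvRow])]
      simp [pvRow]

theorem pvFold (p : List (List Int)) (hp : p ≠ []) (hp2 : 2 ≤ p.length)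
    (hrows : ∀ row ∈ p, row ≠ []) (last : List Int) (hlast : last = p.getLast hp) (n : Nat) :
    (PySem.List.pyRange 1 ((n : Int) + 1) 1).foldlM
      (fun vals i => do
        let c ← pvCycB last i
        pure (List.zipWith (· + ·) vals (vals.drop 1) ++ [c])) (pvRow p 0) = some (pvRow p n) := by
  induction n with
  | zero =>
      rw [show ((0 : Nat) : Int) + 1 = 1 by norm_num, PySem.List.pyRange_one_eq_nil le_rfl]
      rfl
  | succ m ih =>
      rw [show ((m + 1 : Nat) : Int) + 1 = ((m : Int) + 1) + 1 by push_cast; ring]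
      rw [PySem.List.pyRange_one_succ_right (by omega), List.foldlM_append, ih]
      have hlne : last ≠ [] := hlast ▸ hrows _ (List.getLast_mem hp)
      have hc : pvCycB last ((m : Int) + 1) = some (last.getD ((m + 1) % last.length) 0) := by
        have ht : ((m : Int) + 1).toNat = m + 1 := by omega
        rw [pvCycB_eq last ((m : Int) + 1) hlne (by omega), ht]
      simp only [List.foldlM, hc, Option.bind_eq_bind, Option.bind_some]
      rw [pvRow_succ p hp2 m]
      rw [List.drop_length_sub_one hp, ← hlast, pvF_one _ (by simp)]
      simp [List.headI]

theorem alt_generic (p : List (List Int)) (i : Int)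
    (hp : p ≠ []) (hrows : ∀ row ∈ p, row ≠ []) (hi : 0 ≤ i)
    (h1 : ¬ p.length = 1) (h2 : ¬ (p.length = 2 ∧ (p.getD 1 []).length = 1)) :
    get_value_at_alt (some p) i = some (pvF p i.toNat) := by
  have hp2 : 2 ≤ p.length := by
    rcases p with _ | ⟨a, p⟩; · simp at hp
    rcases p with _ | ⟨b, p⟩; · simp at h1
    simp
  obtain ⟨n, rfl⟩ := Int.eq_ofNat_of_zero_le hi
  simp only [get_value_at_alt, if_neg h1, if_neg h2]
  rw [List.getLast?_eq_getLast hp]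
  have hmap : p.dropLast.mapM (fun row => PySem.List.pyGet? row 0) = some (p.dropLast.map List.headI) :=
    pvMapM_head _ (fun r hr => hrows r ((List.dropLast_sublist p).subset hr))
  have hlne : p.getLast hp ≠ [] := hrows _ (List.getLast_mem hp)
  have hv0 : pvCycB (p.getLast hp) 0 = some ((p.getLast hp).getD 0 0) := by
    rw [pvCycB_eq _ 0 hlne le_rfl]
    simp
  simp only [hmap, hv0, Option.bind_eq_bind, Option.bind_some]
  rw [pvRow_zero p hp hp2]
  have hfold := pvFold p hp hp2 hrows _ rfl n
  simp only [Option.bind_eq_bind] at hfold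
  rw [hfold]
  have hne : pvRow p n ≠ [] := by
    simp [pvRow]
    omega
  obtain ⟨v, vs, hv⟩ := List.exists_cons_of_ne_nil hne
  have hv0' : v = pvF p n := by
    have := congrArg (fun l => l[0]?) hv
    simp [pvRow, List.getElem?_eq_getElem, (by omega : 0 < p.length)] at this
    simpa using this.symm
  simp [hv, hv0', List.head?, Int.toNat_natCast]

-- ===== VERDICT (by name: the statement is the Claim_ definition above) =====
theorem get_value_at_spec : Claim_equal_get_value_at := by
  intro pattern index _ hpre
  unfold Spec_get_value_at
  cases pattern with
  | none => rfl
  | some p =>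
      obtain ⟨hp, hrest⟩ := hpre
      have hA : get_value_at (some p) index = pvACore index.toNat p index := rfl
      by_cases h1 : p.length = 1
      · rw [hA, pvACore.eq_def]
        simp only [get_value_at_alt, if_pos h1]
        rfl
      · by_cases h2 : p.length = 2 ∧ (p.getD 1 []).length = 1
        · rw [hA, pvACore.eq_def]
          simp only [get_value_at_alt, if_neg h1, if_pos h2]
        · simp only [if_neg h1, if_neg h2] at hrest
          obtain ⟨hi, hrows⟩ := hrest
          rw [hA, pvACore_eq index.toNat p index le_rfl hi hp hrows,
            alt_generic p index hp hrows hi h1 h2]
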